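-- pv_equiv track=rewrite | github.com/Zeclot/Python_golf | code_golf_1.py | sortOnlyOnceperlist
-- ===== SOURCE A (Python) =====
-- def isInList(list,numb):
--     for i in list:
--         if(i==numb):
--             return False
--     return True
--
-- def numInList(list, numb):
--     for j in range(0, len(list)):
--         if(list[j][0]==numb):
--             id = list[j][1]
--             list[j][1] = list[j][1] + 1
--             return id,list
--
-- def sortOnlyOnceperlist(list):
--     startList = [[]] # Used to track which numbers been seen
--     freqsList = [] # Used to track frequency of startList
--
--     for i in list:
--         if(isInList(startList[0],i)):
--             startList[0].append(i)
--             freqsList.append([i,1])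
--         else:
--             [id,freqsList] = numInList(freqsList,i)
--             if(len(startList)-1<id):
--                 startList.append([])
--             startList[id].append(i)
--
--     return startList
-- ===== SOURCE B (Python) =====
-- def _first_and_rest(xs):
--     seen = set()
--     first = []
--     rest = []
--     for x in xs:
--         if x in seen:
--             rest.append(x)
--         else:
--             seen.add(x)
--             first.append(x)
--     return first, rest
--
-- def sortOnlyOnceperlist(list):
--     first, rest = _first_and_rest(list)
--     res = [first]
--     while rest:
--         first, rest = _first_and_rest(rest)
--         res.append(first)
--     return res
-- ===== Notes on version B (the rewrite author's own statement) =====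
-- stated objective: faster
-- what changed: Instead of A's incremental single pass doing linear membership/index scans per element, B repeatedly peels the layer of first occurrences off the remaining list (one set-based pass per bucket), so bucket k is the first-occurrence layer of the k-times-peeled list.
import Mathlib
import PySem

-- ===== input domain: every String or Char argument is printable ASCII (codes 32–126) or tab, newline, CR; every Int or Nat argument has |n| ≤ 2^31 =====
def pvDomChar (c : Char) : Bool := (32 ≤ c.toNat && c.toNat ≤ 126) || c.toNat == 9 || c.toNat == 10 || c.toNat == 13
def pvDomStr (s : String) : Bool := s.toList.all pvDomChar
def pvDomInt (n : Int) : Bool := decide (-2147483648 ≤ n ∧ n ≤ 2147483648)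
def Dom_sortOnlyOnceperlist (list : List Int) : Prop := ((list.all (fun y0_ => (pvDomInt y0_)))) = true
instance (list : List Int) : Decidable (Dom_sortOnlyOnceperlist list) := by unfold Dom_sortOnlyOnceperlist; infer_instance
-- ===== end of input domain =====

-- B buckets by repeatedly peeling the first-occurrence layer off the remaining list
-- (one set-based pass per bucket) instead of A's incremental scan-per-element pass
-- (objective: alternative). A mutates nothing observable.

-- ===== PORT A =====
def isInList : List Int → Int → Bool
  | [], _ => true
  | i :: rest, numb => if i == numb then false else isInList rest numb

def numInList : List (Int × Int) → Int → Option (Int × List (Int × Int))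
  | [], _ => none        -- Python falls off the loop and returns None
  | (a, b) :: rest, numb =>
      if a == numb then some (b, (a, b + 1) :: rest)
      else
        match numInList rest numb with
        | some (id, l) => some (id, (a, b) :: l)
        | none => none

-- startList[id].append(i); id is an int that is ≥ 0 on every reachable call
def bucketAppend : List (List Int) → Int → Int → List (List Int)
  | [], _, _ => []
  | b :: rest, k, i => if k == 0 then (b ++ [i]) :: rest else b :: bucketAppend rest (k - 1) i

-- one iteration of A's for-loop over (startList, freqsList)
def stepA (st : List (List Int) × List (Int × Int)) (i : Int) :
    List (List Int) × List (Int × Int) :=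
  if isInList (st.1.headD []) i then
    (bucketAppend st.1 0 i, st.2 ++ [(i, 1)])
  else
    match numInList st.2 i with
    | some (id, freqs') =>
        let start := if (st.1.length : Int) - 1 < id then st.1 ++ [[]] else st.1
        (bucketAppend start id i, freqs')
    | none => (st.1, st.2)  -- unreachable: in Python, i seen ⇒ i is a key of freqsList

def sortOnlyOnceperlist (list : List Int) : List (List Int) :=
  (list.foldl stepA ([[]], [])).1

-- ===== PORT B =====
-- one iteration of _first_and_rest's for-loop over (seen, first, rest)
def stepF (st : PySem.Set Int × List Int × List Int) (x : Int) :
    PySem.Set Int × List Int × List Int :=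
  if PySem.Set.contains st.1 x then (st.1, st.2.1, st.2.2 ++ [x])
  else (PySem.Set.add st.1 x, st.2.1 ++ [x], st.2.2)

def firstAndRest (xs : List Int) : List Int × List Int :=
  ((xs.foldl stepF (PySem.Set.empty, [], [])).2.1,
   (xs.foldl stepF (PySem.Set.empty, [], [])).2.2)

-- termination facts for the while loop (cited by peelLoop's decreasing_by)
lemma foldF_len (xs : List Int) : ∀ (s : PySem.Set Int) (f r : List Int),
    ((xs.foldl stepF (s, f, r)).2.1).length + ((xs.foldl stepF (s, f, r)).2.2).length
      = f.length + r.length + xs.length := by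
  induction xs with
  | nil => intro s f r; simp
  | cons x t ih =>
      intro s f r
      simp only [List.foldl_cons, stepF]
      by_cases h : PySem.Set.contains s x
      · simp only [h, if_true]; rw [ih]; simp; omega
      · simp only [h]; rw [ih]; simp; omega

lemma foldF_first_ge (xs : List Int) : ∀ (s : PySem.Set Int) (f r : List Int),
    f.length ≤ ((xs.foldl stepF (s, f, r)).2.1).length := by
  induction xs with
  | nil => intro s f r; simp
  | cons x t ih =>
      intro s f r
      simp only [List.foldl_cons, stepF]
      by_cases h : PySem.Set.contains s x
      · simp only [h, if_true]; exact ih _ _ _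
      · simp only [h]
        calc f.length ≤ (f ++ [x]).length := by simp
          _ ≤ _ := ih _ _ _

lemma rest_lt (l : List Int) (h : ¬ l = []) : (firstAndRest l).2.length < l.length := by
  obtain ⟨x, t, rfl⟩ : ∃ a u, l = a :: u := by
    cases l with | nil => exact absurd rfl h | cons a u => exact ⟨a, u, rfl⟩
  have hstep : stepF (PySem.Set.empty, [], []) x
      = (PySem.Set.add PySem.Set.empty x, [x], []) := by
    simp [stepF, PySem.Set.empty, PySem.Set.contains]
  have hlen := foldF_len t (PySem.Set.add PySem.Set.empty x) [x] []
  have hge := foldF_first_ge t (PySem.Set.add PySem.Set.empty x) [x] []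
  simp only [firstAndRest, List.foldl_cons, hstep]
  simp only [List.length_cons, List.length_nil] at hlen hge ⊢
  omega

-- the while loop of B
def peelLoop (rest : List Int) : List (List Int) :=
  if h : rest = [] then []
  else (firstAndRest rest).1 :: peelLoop (firstAndRest rest).2
termination_by rest.length
decreasing_by exact rest_lt rest h

def sortOnlyOnceperlist_alt (list : List Int) : List (List Int) :=
  (firstAndRest list).1 :: peelLoop (firstAndRest list).2

-- ===== PRECONDITION & SPEC =====
def Spec_sortOnlyOnceperlist (list : List Int) (out : List (List Int)) : Prop := out = sortOnlyOnceperlist_alt list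
instance (list : List Int) (out : List (List Int)) : Decidable (Spec_sortOnlyOnceperlist list out) := by unfold Spec_sortOnlyOnceperlist; infer_instance

-- ===== CLAIM (what is proved, stated in full; the proofs are below) =====
def Claim_equal_sortOnlyOnceperlist : Prop := ∀ (list : List Int), Dom_sortOnlyOnceperlist list → Spec_sortOnlyOnceperlist list (sortOnlyOnceperlist list)

-- ===== LEMMAS AND PROOFS =====

-- proof-internal middle program: the count-dict single pass; A's fold equals it,
-- and it in turn equals B's peeling
def stepC (st : List (List Int) × PySem.Dict Int Int) (i : Int) :
    List (List Int) × PySem.Dict Int Int :=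
  let c := st.2.getD i 0
  let res := if c == (st.1.length : Int) then st.1 ++ [[]] else st.1
  (res.modify c.toNat (· ++ [i]), st.2.insert i (c + 1))

-- ---- part 1: A's fold = the count-dict fold ----

-- invariant tying A's state to the dict state: the buckets are nonempty, startList[0]
-- lists the keys of freqsList in order without repetition, and every stored count c
-- satisfies 1 ≤ c ≤ len(startList)
def InvA (start : List (List Int)) (freqs : List (Int × Int)) : Prop :=
  start ≠ [] ∧ start.headD [] = freqs.map Prod.fst ∧ (freqs.map Prod.fst).Nodup ∧
  ∀ p ∈ freqs, 1 ≤ p.2 ∧ p.2 ≤ (start.length : Int)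

lemma isInList_iff (l : List Int) (i : Int) : isInList l i = true ↔ i ∉ l := by
  induction l with
  | nil => simp [isInList]
  | cons a t ih => by_cases h : a = i <;> simp [isInList, h, ih, Ne.symm]

lemma bucketAppend_eq_modify (l : List (List Int)) (c : Int) (hc : 0 ≤ c) (i : Int) :
    bucketAppend l c i = l.modify c.toNat (· ++ [i]) := by
  induction l generalizing c with
  | nil => simp [bucketAppend]
  | cons b rest ih =>
      by_cases h : c = 0
      · subst h; simp [bucketAppend, List.modify]
      · have h1 : 0 ≤ c - 1 := by omega
        have h2 : c.toNat = (c - 1).toNat + 1 := by omega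
        rw [h2]
        simp [bucketAppend, h, ih _ h1, List.modify]

lemma numInList_of_mem (freqs : List (Int × Int)) (i c : Int)
    (hnd : (freqs.map Prod.fst).Nodup) (hm : (i, c) ∈ freqs) :
    numInList freqs i
      = some (c, freqs.map (fun p => if p.1 = i then (i, c + 1) else p)) := by
  induction freqs with
  | nil => simp at hm
  | cons p t ih =>
      obtain ⟨a, b⟩ := p
      simp only [List.map_cons, List.nodup_cons] at hnd
      rcases List.mem_cons.mp hm with hh | ht
      · injection hh with h1 h2
        subst h1; subst h2
        have hti : ∀ p ∈ t, (if p.1 = i then (i, c + 1) else p) = p := by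
          intro p hp
          rw [if_neg]
          intro he
          exact hnd.1 (he ▸ List.mem_map_of_mem hp)
        simp [numInList, List.map_congr_left hti]
      · have hai : a ≠ i := fun h => hnd.1 (h ▸ List.mem_map_of_mem ht)
        simp [numInList, hai, ih hnd.2 ht]

lemma map_fst_update (freqs : List (Int × Int)) (i c : Int) :
    (freqs.map (fun p => if p.1 = i then (i, c + 1) else p)).map Prod.fst
      = freqs.map Prod.fst := by
  rw [List.map_map]
  refine List.map_congr_left (fun p _ => ?_)
  by_cases h : p.1 = i <;> simp [h]

lemma step_eq (start : List (List Int)) (freqs : List (Int × Int)) (i : Int)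
    (hinv : InvA start freqs) :
    stepC (start, PySem.Dict.mk freqs) i
      = ((stepA (start, freqs) i).1, PySem.Dict.mk (stepA (start, freqs) i).2)
    ∧ InvA (stepA (start, freqs) i).1 (stepA (start, freqs) i).2 := by
  obtain ⟨hne, hhd, hnd, hcnt⟩ := hinv
  obtain ⟨h0, t0, rfl⟩ : ∃ h t, start = h :: t := by
    cases start with | nil => exact absurd rfl hne | cons h t => exact ⟨h, t, rfl⟩
  simp only [List.headD_cons] at hhd
  have hL : (((h0 :: t0).length : Nat) : Int) = (t0.length : Int) + 1 := by
    simp only [List.length_cons]; push_cast; ring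
  by_cases hmem : i ∈ freqs.map Prod.fst
  · -- seen before: A goes through numInList, the dict pass reads a positive count
    have hnotin : isInList h0 i = false := by
      rw [← Bool.not_eq_true, isInList_iff]; simp [hhd, hmem]
    obtain ⟨⟨pi, c⟩, hpm, hpi⟩ := List.mem_map.mp hmem
    have hp : (i, c) ∈ freqs := by rw [← hpi]; exact hpm
    have hnum := numInList_of_mem freqs i c hnd hp
    have hgd : (PySem.Dict.mk freqs).getD i 0 = c :=
      PySem.Dict.getD_of_mem_items (PySem.Dict.mk freqs) hp hnd 0
    have hcont : (PySem.Dict.mk freqs).contains i = true := by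
      rw [PySem.Dict.contains_eq_decide_mem_keys]; simpa using hmem
    have hit : ((PySem.Dict.mk freqs).insert i (c + 1)).items
        = freqs.map (fun p => if p.1 = i then (i, c + 1) else p) := by
      rw [PySem.Dict.items_insert_of_contains (PySem.Dict.mk freqs) (c + 1) hcont]
      exact List.map_congr_left (fun p _ => by by_cases h : p.1 = i <;> simp [h])
    obtain ⟨hc1, hc2⟩ := hcnt (i, c) hp
    have hstep : stepA (h0 :: t0, freqs) i
        = (bucketAppend (if (((h0 :: t0).length : Nat) : Int) - 1 < c then (h0 :: t0) ++ [[]] else h0 :: t0) c i,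
           freqs.map (fun p => if p.1 = i then (i, c + 1) else p)) := by
      simp [stepA, hnotin, hnum]
    have hT : ∃ T : List (List Int),
        (if (((h0 :: t0).length : Nat) : Int) - 1 < c then (h0 :: t0) ++ [[]] else h0 :: t0) = h0 :: T
        ∧ ((h0 :: t0).length : Int) ≤ ((h0 :: T).length : Int)
        ∧ c + 1 ≤ ((h0 :: T).length : Int) := by
      by_cases h : (((h0 :: t0).length : Nat) : Int) - 1 < c
      · exact ⟨t0 ++ [[]], by rw [if_pos h]; simp, by simp, by simp; omega⟩
      · exact ⟨t0, by rw [if_neg h], le_rfl, by omega⟩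
    obtain ⟨T, hTeq, hTlen, hTc⟩ := hT
    have hc0 : c.toNat = (c - 1).toNat + 1 := by omega
    have hmod : (h0 :: T).modify c.toNat (· ++ [i]) = h0 :: T.modify (c - 1).toNat (· ++ [i]) := by
      rw [hc0]; simp [List.modify]
    have hbkt : bucketAppend (if (((h0 :: t0).length : Nat) : Int) - 1 < c then (h0 :: t0) ++ [[]] else h0 :: t0) c i
        = h0 :: T.modify (c - 1).toNat (· ++ [i]) := by
      rw [hTeq, bucketAppend_eq_modify _ _ (by omega), hmod]
    refine ⟨?_, ?_⟩
    · unfold stepC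
      simp only [hstep, hgd]
      refine Prod.ext ?_ (PySem.Dict.ext hit)
      rw [hbkt, ← hmod, ← hTeq]
      have hiff : ((c == (((h0 :: t0).length : Nat) : Int)) = true)
          ↔ ((((h0 :: t0).length : Nat) : Int) - 1 < c) := by
        rw [beq_iff_eq]; omega
      by_cases h : (((h0 :: t0).length : Nat) : Int) - 1 < c
      · rw [if_pos (hiff.mpr h), if_pos h]
      · rw [if_neg (fun hh => h (hiff.mp hh)), if_neg h]
    · rw [hstep, hbkt]
      refine ⟨by simp, ?_, ?_, ?_⟩
      · simp only [List.headD_cons, map_fst_update]; exact hhd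
      · rw [map_fst_update]; exact hnd
      · intro p hpmem
        have hlenres : ((h0 :: T.modify (c - 1).toNat (· ++ [i])).length : Int)
            = ((h0 :: T).length : Int) := by simp [List.length_modify]
        obtain ⟨q, hq, hfq⟩ := List.mem_map.mp hpmem
        by_cases hqi : q.1 = i
        · rw [if_pos hqi] at hfq
          subst hfq
          exact ⟨by omega, by rw [hlenres]; exact hTc⟩
        · rw [if_neg hqi] at hfq
          subst hfq
          obtain ⟨hb1, hb2⟩ := hcnt q hq
          exact ⟨hb1, by rw [hlenres]; omega⟩
  · -- first occurrence
    have hin : isInList h0 i = true := (isInList_iff h0 i).mpr (by simp [hhd, hmem])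
    have hcont : (PySem.Dict.mk freqs).contains i = false := by
      rw [PySem.Dict.contains_eq_decide_mem_keys]; simpa using hmem
    have hgd : (PySem.Dict.mk freqs).getD i 0 = 0 :=
      PySem.Dict.getD_of_not_contains (PySem.Dict.mk freqs) 0 hcont
    have hit : ((PySem.Dict.mk freqs).insert i (0 + 1)).items = freqs ++ [(i, 1)] := by
      rw [PySem.Dict.items_insert_of_not_contains (PySem.Dict.mk freqs) (0 + 1) hcont]; rfl
    have hstep : stepA (h0 :: t0, freqs) i = ((h0 ++ [i]) :: t0, freqs ++ [(i, 1)]) := by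
      simp [stepA, hin, bucketAppend]
    refine ⟨?_, ?_⟩
    · simp only [stepC, hstep, hgd]
      refine Prod.ext ?_ (PySem.Dict.ext hit)
      have hne0 : ¬ (((0 : Int) == (((h0 :: t0).length : Nat) : Int)) = true) := by
        rw [beq_iff_eq]; omega
      rw [if_neg hne0]
      simp [List.modify]
    · rw [hstep]
      refine ⟨by simp, ?_, ?_, ?_⟩
      · simp [hhd]
      · simp only [List.map_append, List.map_cons, List.map_nil]
        simp only [List.nodup_append, List.nodup_singleton, List.mem_singleton]
        refine ⟨hnd, trivial, ?_⟩
        intro a ha b hb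
        subst hb
        intro hai
        exact hmem (hai ▸ ha)
      · intro p hp
        rcases List.mem_append.mp hp with h | h
        · obtain ⟨hb1, hb2⟩ := hcnt p h
          exact ⟨hb1, by simpa using hb2⟩
        · simp only [List.mem_singleton] at h
          subst h
          refine ⟨le_rfl, ?_⟩
          simp

lemma fold_eq (l : List Int) (start : List (List Int)) (freqs : List (Int × Int))
    (hinv : InvA start freqs) :
    (l.foldl stepC (start, PySem.Dict.mk freqs)).1 = (l.foldl stepA (start, freqs)).1 := by
  induction l generalizing start freqs with
  | nil => rfl
  | cons x t ih =>
      obtain ⟨heq, hinv'⟩ := step_eq start freqs x hinv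
      simp only [List.foldl_cons, heq]
      exact ih _ _ hinv'

-- ---- part 2: the count-dict fold = B's peeling ----

lemma foldF_state (p : List Int) : ∀ (s : PySem.Set Int) (r : List Int),
    (p.foldl stepF (s, s, r)).1 = PySem.Set.update s p
    ∧ (p.foldl stepF (s, s, r)).2.1 = PySem.Set.update s p := by
  induction p with
  | nil => intro s r; exact ⟨rfl, rfl⟩
  | cons x t ih =>
      intro s r
      simp only [List.foldl_cons, stepF]
      by_cases h : PySem.Set.contains s x = true
      · have hadd : PySem.Set.add s x = s :=
          PySem.Set.add_of_mem ((PySem.Set.contains_iff s x).mp h)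
        rw [if_pos h, PySem.Set.update_cons, hadd]
        exact ih s (r ++ [x])
      · have hnm : x ∉ s := fun hx => h ((PySem.Set.contains_iff s x).mpr hx)
        have hadd : PySem.Set.add s x = s ++ [x] := PySem.Set.add_of_not_mem hnm
        rw [if_neg h, PySem.Set.update_cons, hadd]
        exact ih (s ++ [x]) r

lemma foldF_seen_first (p : List Int) :
    (p.foldl stepF (PySem.Set.empty, [], [])).1 = PySem.Set.ofList p
    ∧ (p.foldl stepF (PySem.Set.empty, [], [])).2.1 = PySem.Set.ofList p := by
  have h := foldF_state p PySem.Set.empty []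
  rw [PySem.Set.update_empty] at h
  exact h

lemma first_eq_ofList (p : List Int) : (firstAndRest p).1 = PySem.Set.ofList p := by
  exact (foldF_seen_first p).2

lemma firstAndRest_snoc (p : List Int) (x : Int) :
    firstAndRest (p ++ [x])
      = (if x ∈ p then ((firstAndRest p).1, (firstAndRest p).2 ++ [x])
         else ((firstAndRest p).1 ++ [x], (firstAndRest p).2)) := by
  have hs := (foldF_seen_first p).1
  by_cases hm : x ∈ p
  · have hc : (p.foldl stepF (PySem.Set.empty, [], [])).1.contains x = true := by
      rw [hs, PySem.Set.contains_iff, PySem.Set.mem_ofList]; exact hm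
    simp only [firstAndRest, List.foldl_append, List.foldl_cons, List.foldl_nil, stepF,
      hc, if_true, if_pos hm]
  · have hc : ¬ (p.foldl stepF (PySem.Set.empty, [], [])).1.contains x = true := by
      rw [hs, PySem.Set.contains_iff, PySem.Set.mem_ofList]; exact hm
    simp only [firstAndRest, List.foldl_append, List.foldl_cons, List.foldl_nil, stepF,
      if_neg hc, if_neg hm]

lemma count_split (p : List Int) (x : Int) :
    p.count x = (firstAndRest p).1.count x + (firstAndRest p).2.count x := by
  induction p using List.reverseRecOn with
  | nil => rfl
  | append_singleton p y ih =>
      rw [firstAndRest_snoc]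
      by_cases hm : y ∈ p
      · simp only [if_pos hm, List.count_append, ih]; omega
      · simp only [if_neg hm, List.count_append, ih]; omega

lemma first_count_one (p : List Int) (x : Int) (hm : x ∈ p) :
    (firstAndRest p).1.count x = 1 := by
  rw [first_eq_ofList]
  exact List.count_eq_one_of_mem (PySem.Set.nodup_ofList p)
    ((PySem.Set.mem_ofList p x).mpr hm)

lemma foldC_dict (p : List Int) : ∀ (b : List (List Int)) (d : PySem.Dict Int Int),
    (p.foldl stepC (b, d)).2
      = p.foldl (fun d x => d.insert x (d.getD x 0 + 1)) d := by
  induction p with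
  | nil => intro b d; rfl
  | cons x t ih => intro b d; simp only [List.foldl_cons, stepC]; exact ih _ _

lemma dict_fold_count (p : List Int) (x : Int) :
    ((p.foldl stepC ([[]], PySem.Dict.empty)).2).getD x 0 = (p.count x : Int) := by
  rw [foldC_dict, PySem.Dict.getD_foldl_insert_add_one]
  simp

lemma foldC_structure (p : List Int) :
    (p.foldl stepC ([[]], PySem.Dict.empty)).1
      = (firstAndRest p).1 ::
        (if (firstAndRest p).2 = [] then []
         else ((firstAndRest p).2.foldl stepC ([[]], PySem.Dict.empty)).1) := by
  induction p using List.reverseRecOn with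
  | nil => rfl
  | append_singleton p x ih =>
      rw [List.foldl_append, List.foldl_cons, List.foldl_nil, firstAndRest_snoc]
      by_cases hm : x ∈ p
      · rw [if_pos hm]
        have hc : ((p.foldl stepC ([[]], PySem.Dict.empty)).2).getD x 0 = (p.count x : Int) :=
          dict_fold_count p x
        have hc1 : 1 ≤ p.count x := List.one_le_count_iff.mpr hm
        by_cases hr : (firstAndRest p).2 = []
        · -- single previous layer: the bucket list grows
          have hcnt1 : p.count x = 1 := by
            have := count_split p x
            rw [first_count_one p x hm, hr] at this
            simpa using this
          have hr' : ¬ (firstAndRest p).2 ++ [x] = [] := by simp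
          rw [if_neg hr', hr]
          simp only [List.foldl_append, List.foldl_cons, List.foldl_nil] at *
          rw [stepC, stepC]
          simp only [ih, if_pos hr, hc, hcnt1]
          norm_num [List.modify, PySem.Dict.getD_empty]
        · have hr' : ¬ (firstAndRest p).2 ++ [x] = [] := by simp
          rw [if_neg hr', if_neg hr] at *
          rw [List.foldl_append, List.foldl_cons, List.foldl_nil]
          have hc' : (((firstAndRest p).2.foldl stepC ([[]], PySem.Dict.empty)).2).getD x 0
              = ((p.count x : Int) - 1) := by
            rw [dict_fold_count]
            have := count_split p x
            rw [first_count_one p x hm] at this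
            omega
          rw [stepC, stepC]
          simp only [ih, hc, hc']
          set T := ((firstAndRest p).2.foldl stepC ([[]], PySem.Dict.empty)).1 with hT
          have hgrow : (((p.count x : Int)) == (((firstAndRest p).1 :: T).length : Int))
              = (((p.count x : Int) - 1) == ((T.length : Int))) := by
            simp only [List.length_cons]
            by_cases h : (p.count x : Int) - 1 = (T.length : Int)
            · rw [beq_iff_eq.mpr h, beq_iff_eq.mpr (by push_cast; omega)]
            · have h2 : ¬ (p.count x : Int) = (((T.length + 1 : Nat)) : Int) := by push_cast; omega
              rw [Bool.eq_iff_iff]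
              simp only [beq_iff_eq]
              constructor
              · intro hh; exfalso; exact h2 (by exact_mod_cast hh)
              · intro hh; exact absurd hh h
          have htn : ((p.count x : Int)).toNat = ((p.count x : Int) - 1).toNat + 1 := by omega
          by_cases hg : ((p.count x : Int) - 1) == ((T.length : Int))
          · rw [hgrow, hg]
            simp only [if_true, htn]
            simp [List.modify, List.cons_append]
          · rw [hgrow]
            simp only [hg, Bool.false_eq_true, if_false, htn]
            simp [List.modify]
      · rw [if_neg hm]
        have hc : ((p.foldl stepC ([[]], PySem.Dict.empty)).2).getD x 0 = (0 : Int) := by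
          rw [dict_fold_count, List.count_eq_zero_of_not_mem hm]; rfl
        rw [stepC]
        simp only [ih, hc]
        have : ¬ ((0 : Int) == ((((firstAndRest p).1 ::
            (if (firstAndRest p).2 = [] then []
             else ((firstAndRest p).2.foldl stepC ([[]], PySem.Dict.empty)).1)).length : Nat) : Int)) = true := by
          simp only [beq_iff_eq, List.length_cons]
          intro h
          omega
        rw [if_neg this]
        simp [List.modify]

lemma foldC_eq_alt (l : List Int) :
    (l.foldl stepC ([[]], PySem.Dict.empty)).1 = sortOnlyOnceperlist_alt l := by
  rw [foldC_structure, sortOnlyOnceperlist_alt]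
  congr 1
  by_cases hr : (firstAndRest l).2 = []
  · rw [if_pos hr, hr, peelLoop]
    simp
  · rw [if_neg hr, foldC_eq_alt (firstAndRest l).2]
    conv_rhs => rw [peelLoop]
    rw [dif_neg hr, sortOnlyOnceperlist_alt]
termination_by l.length
decreasing_by
  have hl : ¬ l = [] := by
    intro h; subst h; exact hr rfl
  exact rest_lt l hl

-- ===== VERDICT (by name: the statement is the Claim_ definition above) =====
theorem sortOnlyOnceperlist_spec : Claim_equal_sortOnlyOnceperlist := by
  intro list _
  unfold Spec_sortOnlyOnceperlist sortOnlyOnceperlist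
  have h := fold_eq list [[]] [] (by refine ⟨by simp, rfl, by simp, by simp⟩)
  have hempty : (PySem.Dict.empty : PySem.Dict Int Int) = PySem.Dict.mk [] := rfl
  rw [← h, ← hempty, foldC_eq_alt]
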